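-- pv_equiv track=rewrite | github.com/JHpusd/Simulation | math_stuff.py | next_cycle_term
-- ===== SOURCE A (Python) =====
-- def next_cycle_term(target_term, cycle_list):
--     for cycle in cycle_list:
--         if target_term in cycle:
--             index = cycle.index(target_term)
--             try:
--                 return cycle[index+1]
--             except IndexError:
--                 return cycle[0]
--     return target_term
-- ===== SOURCE B (Python) =====
-- def next_cycle_term(target_term, cycle_list):
--     successor = {}
--     for cycle in cycle_list:
--         n = len(cycle)
--         for i, term in enumerate(cycle):
--             successor.setdefault(term, cycle[(i + 1) % n])
--     return successor.get(target_term, target_term)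
-- ===== Notes on version B (the rewrite author's own statement) =====
-- stated objective: idiomatic
-- what changed: Replaces the scan with cycle.index plus try/except IndexError by one precomputed successor dictionary built with setdefault (first occurrence wins, wraparound via modulo) and a single .get lookup.
import Mathlib
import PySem

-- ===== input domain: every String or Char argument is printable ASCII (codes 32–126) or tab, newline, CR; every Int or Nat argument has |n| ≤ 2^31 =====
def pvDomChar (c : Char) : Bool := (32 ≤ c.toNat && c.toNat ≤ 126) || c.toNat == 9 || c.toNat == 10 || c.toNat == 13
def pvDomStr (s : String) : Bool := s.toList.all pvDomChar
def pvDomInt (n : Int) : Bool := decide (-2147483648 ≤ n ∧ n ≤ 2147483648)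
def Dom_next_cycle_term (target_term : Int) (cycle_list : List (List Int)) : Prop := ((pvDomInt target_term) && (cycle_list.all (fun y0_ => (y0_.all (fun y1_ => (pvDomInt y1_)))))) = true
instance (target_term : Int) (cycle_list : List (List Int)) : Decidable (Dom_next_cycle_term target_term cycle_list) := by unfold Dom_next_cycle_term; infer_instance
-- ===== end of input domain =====

-- B replaces A's scan + index()/try-except by a setdefault-built successor dictionary and one lookup (idiomatic; same cost).

-- ===== PORT A =====
def next_cycle_term (target_term : Int) (cycle_list : List (List Int)) : Int :=
  match cycle_list with
  | [] => target_term
  | cycle :: rest =>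
    if target_term ∈ cycle then
      match PySem.List.index? cycle target_term with
      | some index =>
        match PySem.List.pyGet? cycle ((index : Int) + 1) with
        | some v => v                                -- return cycle[index+1]
        | none => PySem.List.pyGetD cycle 0 target_term  -- except IndexError: return cycle[0] (cycle nonempty here)
      | none => target_term                          -- unreachable: membership was checked
    else next_cycle_term target_term rest

-- ===== PORT B =====
def next_cycle_term_alt (target_term : Int) (cycle_list : List (List Int)) : Int :=
  let successor : PySem.Dict Int Int :=
    cycle_list.foldl (fun d cycle =>
      (PySem.List.enumerate cycle 0).foldl (fun d p =>
        d.setdefault p.2 (PySem.List.pyGetD cycle (PySem.Int.mod (p.1 + 1) (cycle.length : Int)) 0)) d)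
      PySem.Dict.empty
  (successor.get? target_term).getD target_term

-- ===== PRECONDITION & SPEC =====
def Spec_next_cycle_term (target_term : Int) (cycle_list : List (List Int)) (out : Int) : Prop := out = next_cycle_term_alt target_term cycle_list
instance (target_term : Int) (cycle_list : List (List Int)) (out : Int) : Decidable (Spec_next_cycle_term target_term cycle_list out) := by unfold Spec_next_cycle_term; infer_instance

-- ===== CLAIM (what is proved, stated in full; the proofs are below) =====
def Claim_equal_next_cycle_term : Prop := ∀ (target_term : Int) (cycle_list : List (List Int)), Dom_next_cycle_term target_term cycle_list → Spec_next_cycle_term target_term cycle_list (next_cycle_term target_term cycle_list)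

-- ===== LEMMAS AND PROOFS =====

-- value stored by B for position i of cycle c
def pvGfun (c : List Int) (i : Nat) : Int :=
  PySem.List.pyGetD c (PySem.Int.mod ((i : Int) + 1) (c.length : Int)) 0

-- what the chain of cycles contributes for target t
def pvChain (t : Int) : List (List Int) → Option Int
  | [] => none
  | c :: rest => ((PySem.List.index? c t).map (pvGfun c)).orElse (fun _ => pvChain t rest)

lemma pv_get?_foldl_setdefault (g : Int → Int) (t : Int) :
    ∀ (ps : List (Int × Int)) (d : PySem.Dict Int Int),
      ((ps.foldl (fun d p => d.setdefault p.2 (g p.1)) d).get? t)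
        = ((d.get? t).orElse (fun _ => (ps.find? (fun p => p.2 == t)).map (fun p => g p.1)))
  | [], d => by cases h : d.get? t <;> simp [h]
  | p :: ps, d => by
    rw [List.foldl_cons, pv_get?_foldl_setdefault g t ps]
    by_cases h : p.2 = t
    · rw [List.find?_cons_of_pos (by simp [h]), h, PySem.Dict.get?_setdefault_self]
      cases d.get? t <;> simp
    · rw [PySem.Dict.get?_setdefault_of_ne _ _ (fun he => h he.symm),
        List.find?_cons_of_neg (by simp [h])]

lemma pv_find?_enumerate (t : Int) :
    ∀ (c : List Int) (s : Int),
      ((PySem.List.enumerate c s).find? (fun p => p.2 == t))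
        = (PySem.List.index? c t).map (fun i => ((i : Int) + s, t))
  | [], s => by simp [PySem.List.enumerate, PySem.List.index?]
  | x :: xs, s => by
    have hen : PySem.List.enumerate (x :: xs) s = (s, x) :: PySem.List.enumerate xs (s + 1) := by simp [PySem.List.enumerate]
    rw [hen]
    by_cases h : x = t
    · subst h
      rw [List.find?_cons_of_pos (by simp), PySem.List.index?_cons_self]
      simp
    · rw [List.find?_cons_of_neg (by simp [h]), PySem.List.index?_cons_of_ne _ h,
        pv_find?_enumerate t xs (s + 1)]
      cases PySem.List.index? xs t
      · simp
      · simp only [Option.map_some, Option.bind_some, Option.bind_eq_bind]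
        push_cast
        simp only [Option.pure_def, Option.map_some, Option.some.injEq, Prod.mk.injEq, and_true]
        ring

lemma pv_inner (c : List Int) (d : PySem.Dict Int Int) (t : Int) :
    (((PySem.List.enumerate c 0).foldl (fun d p =>
        d.setdefault p.2 (PySem.List.pyGetD c (PySem.Int.mod (p.1 + 1) (c.length : Int)) 0)) d).get? t)
      = ((d.get? t).orElse (fun _ => (PySem.List.index? c t).map (pvGfun c))) := by
  have := pv_get?_foldl_setdefault (fun i => PySem.List.pyGetD c (PySem.Int.mod (i + 1) (c.length : Int)) 0) t (PySem.List.enumerate c 0) d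
  rw [this, pv_find?_enumerate t c 0, Option.map_map]
  cases PySem.List.index? c t <;> simp [pvGfun]

lemma pv_outer (t : Int) :
    ∀ (cl : List (List Int)) (d : PySem.Dict Int Int),
      ((cl.foldl (fun d cycle =>
          (PySem.List.enumerate cycle 0).foldl (fun d p =>
            d.setdefault p.2 (PySem.List.pyGetD cycle (PySem.Int.mod (p.1 + 1) (cycle.length : Int)) 0)) d) d).get? t)
        = ((d.get? t).orElse (fun _ => pvChain t cl))
  | [], d => by cases h : d.get? t <;> simp [pvChain, h]
  | c :: rest, d => by
    rw [List.foldl_cons, pv_outer t rest, pv_inner, pvChain]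
    cases d.get? t <;> simp

lemma pv_alt_eq (t : Int) (cl : List (List Int)) :
    next_cycle_term_alt t cl = (pvChain t cl).getD t := by
  simp only [next_cycle_term_alt]
  rw [pv_outer t cl PySem.Dict.empty]
  simp

lemma pv_branch_eq (t : Int) (c : List Int) (i : Nat) (hi : PySem.List.index? c t = some i) :
    (match PySem.List.pyGet? c ((i : Int) + 1) with
      | some v => v
      | none => PySem.List.pyGetD c 0 t) = pvGfun c i := by
  obtain ⟨hk, -, -⟩ := PySem.List.getElem_of_index?_eq_some hi
  have hlen : 0 < c.length := by omega
  have hcast : ((i : Int) + 1) = ((i + 1 : Nat) : Int) := by push_cast; ring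
  by_cases h1 : i + 1 < c.length
  · rw [hcast, PySem.List.pyGet?_ofNat c (i + 1) h1]
    have hm : PySem.Int.mod ((i : Int) + 1) (c.length : Int) = ((i : Int) + 1) := by
      rw [PySem.Int.mod_eq_emod_of_pos (by exact_mod_cast hlen)]
      exact Int.emod_eq_of_lt (by positivity) (by exact_mod_cast h1)
    simp only [pvGfun, hm]
    rw [PySem.List.pyGetD_eq_getElem c 0 (by positivity) (by exact_mod_cast h1)]
    norm_num
  · have he : ((i : Int) + 1) = (c.length : Int) := by
      have : i + 1 = c.length := by omega
      push_cast [← this]; ring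
    rw [hcast, PySem.List.pyGet?_natCast, List.getElem?_eq_none (by omega)]
    have hm : PySem.Int.mod ((i : Int) + 1) (c.length : Int) = 0 := by
      rw [PySem.Int.mod_eq_emod_of_pos (by exact_mod_cast hlen), he]
      simp
    simp only [pvGfun, hm]
    rw [PySem.List.pyGetD_eq_getElem c t le_rfl (by exact_mod_cast hlen),
      PySem.List.pyGetD_eq_getElem c 0 le_rfl (by exact_mod_cast hlen)]

lemma pv_A_eq (t : Int) : ∀ (cl : List (List Int)),
    next_cycle_term t cl = (pvChain t cl).getD t
  | [] => by simp [next_cycle_term, pvChain]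
  | c :: rest => by
    rw [next_cycle_term, pvChain]
    by_cases hmem : t ∈ c
    · have hs : (PySem.List.index? c t).isSome := (PySem.List.index?_isSome_iff c t).2 hmem
      obtain ⟨i, hi⟩ := Option.isSome_iff_exists.1 hs
      rw [if_pos hmem, hi]
      simpa using pv_branch_eq t c i hi
    · have hn : PySem.List.index? c t = none := (PySem.List.index?_eq_none_iff c t).2 hmem
      rw [if_neg hmem, hn]
      simpa using pv_A_eq t rest

-- ===== VERDICT (by name: the statement is the Claim_ definition above) =====
theorem next_cycle_term_spec : Claim_equal_next_cycle_term := by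
  intro t cl _
  unfold Spec_next_cycle_term
  rw [pv_alt_eq, pv_A_eq]
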